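-- pv_equiv track=rewrite | github.com/kyj0107/Final_Project | app.py | generate_ticket
-- ===== SOURCE A (Python) =====
-- def generate_ticket(first_name):
--
--     bus_name = "INFOTC4320"
--     code = ""
--     count = 0
--
--     if len(first_name) < len(bus_name):
--         for letter in range(len(first_name)):
--             code += first_name[letter] + bus_name[letter]
--             count += 1
--         code += bus_name[count:]
--     elif len(first_name) == len(bus_name):
--         for letter in range(len(first_name)):
--             code += first_name[letter] + bus_name[letter]
--     else:
--         for letter in range(len(bus_name)):
--             code += first_name[letter] + bus_name[letter]
--             count += 1
--         code += first_name[count:]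
--     return code
-- ===== SOURCE B (Python) =====
-- def generate_ticket(first_name):
--     def weave(f, b):
--         if not f:
--             return b
--         if not b:
--             return f
--         return f[0] + b[0] + weave(f[1:], b[1:])
--     return weave(first_name, "INFOTC4320")
-- ===== Notes on version B (the rewrite author's own statement) =====
-- stated objective: simpler
-- what changed: Replaces A's three length-comparison branches, index-range loops and count cursor with a single structural recursion on both strings whose two base cases return the remaining suffix directly.
import Mathlib
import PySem

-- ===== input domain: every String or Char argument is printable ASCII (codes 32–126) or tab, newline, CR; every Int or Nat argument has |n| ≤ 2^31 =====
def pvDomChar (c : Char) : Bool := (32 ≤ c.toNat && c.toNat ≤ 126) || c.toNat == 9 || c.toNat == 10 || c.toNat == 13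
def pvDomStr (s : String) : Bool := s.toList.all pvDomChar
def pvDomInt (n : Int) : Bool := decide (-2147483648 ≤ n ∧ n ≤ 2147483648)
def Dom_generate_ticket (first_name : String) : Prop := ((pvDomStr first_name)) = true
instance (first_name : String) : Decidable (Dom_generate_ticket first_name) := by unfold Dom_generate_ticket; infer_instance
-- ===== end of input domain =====

-- B replaces A's three length-comparison branches, index loops and count cursor by one
-- structural recursion weaving both strings, base cases returning the remaining suffix
-- (objective: simpler); return values proved equal.


-- ===== PORT A =====
-- transliteration of A: three branches on the length comparison, each with an index loop
-- over range(...) accumulating (code, count); indices are always in range, so pyGetD is exact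
def generate_ticket (first_name : String) : String :=
  let f := first_name.toList
  let b := "INFOTC4320".toList
  if f.length < b.length then
    let st := (PySem.List.pyRange 0 (f.length : Int) 1).foldl
      (fun (st : List Char × Int) i =>
        (st.1 ++ [PySem.List.pyGetD f i ' ', PySem.List.pyGetD b i ' '], st.2 + 1)) ([], 0)
    String.ofList (st.1 ++ PySem.List.slice b (some st.2) none)
  else if f.length = b.length then
    String.ofList ((PySem.List.pyRange 0 (f.length : Int) 1).foldl
      (fun (code : List Char) i =>
        code ++ [PySem.List.pyGetD f i ' ', PySem.List.pyGetD b i ' ']) [])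
  else
    let st := (PySem.List.pyRange 0 (b.length : Int) 1).foldl
      (fun (st : List Char × Int) i =>
        (st.1 ++ [PySem.List.pyGetD f i ' ', PySem.List.pyGetD b i ' '], st.2 + 1)) ([], 0)
    String.ofList (st.1 ++ PySem.List.slice f (some st.2) none)

-- ===== PORT B =====
-- transliteration of B: structural recursion on both strings; empty side returns the other
def pvWeave : List Char → List Char → List Char
  | [], b => b
  | f, [] => f
  | x :: f, y :: b => x :: y :: pvWeave f b

def generate_ticket_alt (first_name : String) : String :=
  String.ofList (pvWeave first_name.toList "INFOTC4320".toList)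

-- ===== PRECONDITION & SPEC =====
def Spec_generate_ticket (first_name : String) (out : String) : Prop := out = generate_ticket_alt first_name
instance (first_name : String) (out : String) : Decidable (Spec_generate_ticket first_name out) := by unfold Spec_generate_ticket; infer_instance

-- ===== CLAIM (what is proved, stated in full; the proofs are below) =====
def Claim_equal_generate_ticket : Prop := ∀ (first_name : String), Dom_generate_ticket first_name → Spec_generate_ticket first_name (generate_ticket first_name)

-- ===== LEMMAS AND PROOFS =====

-- the weave equals the interleaved zip followed by both remainders
theorem pv_weave_eq (f b : List Char) :
    pvWeave f b
      = ((f.zip b).flatMap (fun p => [p.1, p.2]))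
          ++ f.drop (min f.length b.length) ++ b.drop (min f.length b.length) := by
  induction f generalizing b with
  | nil => simp [pvWeave]
  | cons x xs ih =>
    cases b with
    | nil => simp [pvWeave]
    | cons y ys => simp [pvWeave, ih ys, Nat.succ_min_succ]

-- zip truncates to the shorter list
theorem pv_zip_eq_take {α β : Type} (f : List α) (b : List β) (n : Nat)
    (h : n = min f.length b.length) : f.zip b = (f.take n).zip (b.take n) := by
  subst h
  induction f generalizing b with
  | nil => simp
  | cons x xs ih =>
    cases b with
    | nil => simp
    | cons y ys => simp [List.zip_cons_cons, Nat.succ_min_succ, ih]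

-- the (code, count) loop of A's first and third branches
theorem pv_fold_cnt (f b : List Char) (n : Nat) (hf : n ≤ f.length) (hb : n ≤ b.length) :
    (PySem.List.pyRange 0 (n : Int) 1).foldl
      (fun (st : List Char × Int) i =>
        (st.1 ++ [PySem.List.pyGetD f i ' ', PySem.List.pyGetD b i ' '], st.2 + 1)) ([], 0)
    = (((f.take n).zip (b.take n)).flatMap (fun p => [p.1, p.2]), (n : Int)) := by
  induction n with
  | zero => simp [PySem.List.pyRange_one_eq_nil]
  | succ m ih =>
    have h1 : ((m + 1 : Nat) : Int) = (m : Int) + 1 := by push_cast; ring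
    rw [h1, PySem.List.pyRange_one_succ_right (by positivity)]
    rw [List.foldl_append, ih (by omega) (by omega)]
    have hfm : m < f.length := by omega
    have hbm : m < b.length := by omega
    simp only [List.foldl_cons, List.foldl_nil, PySem.List.pyGetD_natCast]
    rw [List.take_add_one, List.take_add_one,
        List.getElem?_eq_getElem hfm, List.getElem?_eq_getElem hbm]
    rw [List.zip_append (by simp [hfm.le, hbm.le])]
    simp [List.getD_eq_getElem?_getD, List.getElem?_eq_getElem hfm, List.getElem?_eq_getElem hbm]

-- the code-only loop of A's equal-length branch
theorem pv_fold_code (f b : List Char) (n : Nat) (hf : n ≤ f.length) (hb : n ≤ b.length) :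
    (PySem.List.pyRange 0 (n : Int) 1).foldl
      (fun (code : List Char) i =>
        code ++ [PySem.List.pyGetD f i ' ', PySem.List.pyGetD b i ' ']) []
    = ((f.take n).zip (b.take n)).flatMap (fun p => [p.1, p.2]) := by
  have h := pv_fold_cnt f b n hf hb
  have hfst : ∀ (l : List Int) (acc : List Char) (c : Int),
      (l.foldl (fun (st : List Char × Int) i =>
        (st.1 ++ [PySem.List.pyGetD f i ' ', PySem.List.pyGetD b i ' '], st.2 + 1)) (acc, c)).1
      = l.foldl (fun (code : List Char) i =>
        code ++ [PySem.List.pyGetD f i ' ', PySem.List.pyGetD b i ' ']) acc := by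
    intro l
    induction l with
    | nil => intro acc c; rfl
    | cons x xs ih => intro acc c; simp [List.foldl_cons, ih]
  have := congrArg Prod.fst h
  rw [hfst] at this
  simpa using this

-- ===== VERDICT (by name: the statement is the Claim_ definition above) =====
theorem generate_ticket_spec : Claim_equal_generate_ticket := by
  intro s _
  unfold Spec_generate_ticket generate_ticket generate_ticket_alt
  set f := s.toList with hfdef
  set b := ("INFOTC4320" : String).toList with hbdef
  simp only
  rw [pv_weave_eq]
  by_cases h1 : f.length < b.length
  · rw [if_pos h1]
    have hn : min f.length b.length = f.length := by omega
    rw [pv_fold_cnt f b f.length le_rfl h1.le]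
    simp only [hn, PySem.List.slice_from_natCast]
    rw [pv_zip_eq_take f b f.length (by omega)]
    simp
  · rw [if_neg h1]
    by_cases h2 : f.length = b.length
    · rw [if_pos h2]
      have hn : min f.length b.length = f.length := by omega
      rw [pv_fold_code f b f.length le_rfl (by omega)]
      simp only [hn]
      rw [pv_zip_eq_take f b f.length (by omega)]
      simp [List.drop_eq_nil_of_le h2.ge]
    · rw [if_neg h2]
      have hn : min f.length b.length = b.length := by omega
      rw [pv_fold_cnt f b b.length (by omega) le_rfl]
      simp only [hn, PySem.List.slice_from_natCast]
      rw [pv_zip_eq_take f b b.length (by omega)]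
      simp
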